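-- pv_equiv track=rewrite | github.com/alainrollejr/mypygames | reinforcement_learning/blackjack.py | has_usable_ace
-- ===== SOURCE A (Python) =====
-- def has_usable_ace(cards):
--     ace_used = False
--     ace_found = False
--     sum = 0
--     for c in cards:
--         if c == 1:
--             ace_found = True
--             if ace_used == False:
--                 ace_used = True
--                 sum += 11
--             else:
--                 sum +=1
--         else:
--             sum += c
--
--     if ace_found == True:
--         if sum > 21:
--             return False
--         else:
--             return True
--     else:
--         return False
-- ===== SOURCE B (Python) =====
-- def has_usable_ace(cards):
--     return 1 in cards and sum(cards) <= 11
-- ===== Notes on version B (the rewrite author's own statement) =====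
-- stated objective: simpler
-- what changed: Replaces A's stateful loop (tracking ace_used/ace_found and an accumulating sum) with the closed form: the loop total equals sum(cards)+10 when an ace is present, so B returns (1 in cards) and (sum(cards) <= 11).
import Mathlib
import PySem

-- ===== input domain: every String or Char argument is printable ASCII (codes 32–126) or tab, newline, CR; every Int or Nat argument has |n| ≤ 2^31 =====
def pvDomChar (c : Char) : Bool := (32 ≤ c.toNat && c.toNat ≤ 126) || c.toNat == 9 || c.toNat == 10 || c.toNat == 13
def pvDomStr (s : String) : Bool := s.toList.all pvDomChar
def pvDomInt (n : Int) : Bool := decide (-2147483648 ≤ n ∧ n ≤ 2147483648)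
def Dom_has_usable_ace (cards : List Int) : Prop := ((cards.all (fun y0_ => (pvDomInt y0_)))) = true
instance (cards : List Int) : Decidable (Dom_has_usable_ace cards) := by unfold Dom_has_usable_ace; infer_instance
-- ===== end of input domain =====

-- B replaces A's stateful loop with a closed form (membership test plus one sum comparison); objective: simpler.

-- ===== PORT A =====
-- loop body of A, one step over state (ace_used, ace_found, sum)
def pvStepA (st : Bool × Bool × Int) (c : Int) : Bool × Bool × Int :=
  let (ace_used, ace_found, s) := st
  if c == 1 then
    if ace_used == false then (true, true, s + 11)
    else (ace_used, true, s + 1)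
  else (ace_used, ace_found, s + c)

def has_usable_ace (cards : List Int) : Bool :=
  let st := cards.foldl pvStepA (false, false, 0)
  if st.2.1 == true then
    if st.2.2 > 21 then false else true
  else false

-- ===== PORT B =====
def has_usable_ace_alt (cards : List Int) : Bool :=
  cards.contains 1 && decide (cards.sum ≤ 11)

-- ===== PRECONDITION & SPEC =====
def Spec_has_usable_ace (cards : List Int) (out : Bool) : Prop := out = has_usable_ace_alt cards
instance (cards : List Int) (out : Bool) : Decidable (Spec_has_usable_ace cards out) := by unfold Spec_has_usable_ace; infer_instance

-- ===== CLAIM (what is proved, stated in full; the proofs are below) =====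
def Claim_equal_has_usable_ace : Prop := ∀ (cards : List Int), Dom_has_usable_ace cards → Spec_has_usable_ace cards (has_usable_ace cards)

-- ===== LEMMAS AND PROOFS =====

-- Loop invariant: starting from (b, b, s), the fold ends at
-- (b || contains 1, b || contains 1, s + sum + (10 iff the first ace was counted as 11)).
theorem has_usable_ace_fold (cards : List Int) (b : Bool) (s : Int) :
    cards.foldl pvStepA (b, b, s)
    = (b || cards.contains 1, b || cards.contains 1,
       s + cards.sum + (if !b && cards.contains 1 then 10 else 0)) := by
  induction cards generalizing b s with
  | nil => simp
  | cons c cs ih =>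
    rw [List.foldl_cons]
    by_cases hc : c = 1
    · subst hc
      cases b with
      | false =>
        have hstep : pvStepA (false, false, s) 1 = (true, true, s + 11) := rfl
        rw [hstep, ih]
        simp
        omega
      | true =>
        have hstep : pvStepA (true, true, s) 1 = (true, true, s + 1) := rfl
        rw [hstep, ih]
        simp
        omega
    · have hstep : pvStepA (b, b, s) c = (b, b, s + c) := by
        simp [pvStepA, hc]
      rw [hstep, ih]
      have h1 : (1 = c) = False := by
        simp only [eq_iff_iff, iff_false]
        exact fun h => hc h.symm
      simp [h1]
      omega

-- ===== VERDICT (by name: the statement is the Claim_ definition above) =====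
theorem has_usable_ace_spec : Claim_equal_has_usable_ace := by
  intro cards _
  unfold Spec_has_usable_ace has_usable_ace has_usable_ace_alt
  rw [has_usable_ace_fold]
  by_cases h : (1 : Int) ∈ cards
  · by_cases hs : cards.sum ≤ 11
    · simp [h, hs]; omega
    · simp [h, hs]; omega
  · simp [h]
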